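-- pv_equiv track=rewrite | github.com/konstdimasik/python_code | Advent of code/advent6.py | count_anyone_answers
-- ===== SOURCE A (Python) =====
-- def count_anyone_answers(list):
--     answers = set()
--     counter = 0
--     for group in list:
--         for answer in group:
--             if answer not in answers:
--                 answers.add(answer)
--         counter += len(answers)
--         answers.clear()
--     return counter
-- ===== SOURCE B (Python) =====
-- def count_anyone_answers(list):
--     total = 0
--     for group in list:
--         s = sorted(group)
--         if s:
--             total += 1 + sum(1 if a != b else 0 for a, b in zip(s, s[1:]))
--     return total
-- ===== Notes on version B (the rewrite author's own statement) =====
-- stated objective: alternative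
-- what changed: Replaces the incrementally maintained set (hash membership test per answer) with sort-then-adjacent-compare: each group is sorted and the distinct count is 1 plus the number of adjacent unequal pairs.
import Mathlib
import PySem

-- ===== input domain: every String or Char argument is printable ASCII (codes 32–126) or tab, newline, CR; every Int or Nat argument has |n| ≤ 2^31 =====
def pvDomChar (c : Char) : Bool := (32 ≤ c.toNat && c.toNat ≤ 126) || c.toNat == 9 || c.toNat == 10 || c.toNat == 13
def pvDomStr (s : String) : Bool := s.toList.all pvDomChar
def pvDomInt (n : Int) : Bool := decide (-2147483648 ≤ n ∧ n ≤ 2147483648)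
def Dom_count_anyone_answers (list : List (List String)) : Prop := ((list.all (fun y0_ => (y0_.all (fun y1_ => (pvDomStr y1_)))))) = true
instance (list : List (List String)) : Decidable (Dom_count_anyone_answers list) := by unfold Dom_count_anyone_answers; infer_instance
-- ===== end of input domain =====

-- B replaces A's incrementally maintained set with sort-then-adjacent-compare per group (alternative decomposition, not faster).
-- ===== PORT A =====
def count_anyone_answers (list : List (List String)) : Int :=
  (list.foldl
    (fun (st : PySem.Set String × Int) (group : List String) =>
      let answers := group.foldl
        (fun (answers : PySem.Set String) (answer : String) =>
          if !(PySem.Set.contains answers answer) then PySem.Set.add answers answer else answers)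
        st.1
      (PySem.Set.empty, st.2 + PySem.Set.len answers))
    (PySem.Set.empty, 0)).2

-- ===== PORT B =====
def pvGroupDistinct (group : List String) : Int :=
  match PySem.List.sorted group (fun x => x) false with
  | [] => 0
  | a :: t =>
      1 + (((a :: t).zip (PySem.List.slice (a :: t) (some 1) none)).map
            (fun p => if p.1 ≠ p.2 then (1 : Int) else 0)).sum

def count_anyone_answers_alt (list : List (List String)) : Int :=
  list.foldl (fun total group => total + pvGroupDistinct group) 0

-- ===== PRECONDITION & SPEC =====
def Spec_count_anyone_answers (list : List (List String)) (out : Int) : Prop := out = count_anyone_answers_alt list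
instance (list : List (List String)) (out : Int) : Decidable (Spec_count_anyone_answers list out) := by unfold Spec_count_anyone_answers; infer_instance

-- ===== CLAIM (what is proved, stated in full; the proofs are below) =====
def Claim_equal_count_anyone_answers : Prop := ∀ (list : List (List String)), Dom_count_anyone_answers list → Spec_count_anyone_answers list (count_anyone_answers list)

-- ===== LEMMAS AND PROOFS =====

-- A's guarded insertion is exactly Set.add
lemma pv_branch_eq_add (s : PySem.Set String) (a : String) :
    (if !(PySem.Set.contains s a) then PySem.Set.add s a else s) = PySem.Set.add s a := by
  by_cases h : a ∈ s
  · rw [PySem.Set.add_of_mem h]; simp [h]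
  · simp [h]

lemma pv_inner_fold (g : List String) :
    g.foldl
      (fun (answers : PySem.Set String) (answer : String) =>
        if !(PySem.Set.contains answers answer) then PySem.Set.add answers answer else answers)
      PySem.Set.empty = PySem.Set.ofList g := by
  have hf : (fun (answers : PySem.Set String) (answer : String) =>
      if !(PySem.Set.contains answers answer) then PySem.Set.add answers answer else answers)
      = PySem.Set.add := by
    funext s a; exact pv_branch_eq_add s a
  rw [hf, PySem.Set.ofList_eq_foldl]
  rfl

-- the number of distinct elements of a list, as a Finset cardinality
lemma pv_len_ofList (g : List String) :
    PySem.Set.len (PySem.Set.ofList g) = (g.toFinset.card : Int) := by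
  have hn : (PySem.Set.ofList g).Nodup := PySem.Set.nodup_ofList g
  have ht : (PySem.Set.ofList g).toFinset = g.toFinset := by
    ext x; simp [List.mem_toFinset, PySem.Set.mem_ofList]
  have hl : (PySem.Set.ofList g).length = g.toFinset.card := by
    rw [← ht]; exact (List.toFinset_card_of_nodup hn).symm
  simp [PySem.Set.len, hl]

-- A's running fold, with the accumulator generalized
lemma pv_A_fold (l : List (List String)) (c : Int) :
    (l.foldl
      (fun (st : PySem.Set String × Int) (group : List String) =>
        let answers := group.foldl
          (fun (answers : PySem.Set String) (answer : String) =>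
            if !(PySem.Set.contains answers answer) then PySem.Set.add answers answer else answers)
          st.1
        (PySem.Set.empty, st.2 + PySem.Set.len answers))
      (PySem.Set.empty, c)).2
    = c + (l.map (fun g => ((g.toFinset.card : Nat) : Int))).sum := by
  induction l generalizing c with
  | nil => simp
  | cons g t ih =>
    simp only [List.foldl_cons, List.map_cons, List.sum_cons]
    rw [show (PySem.Set.empty : PySem.Set String) = ([] : List String) from rfl] at *
    have : (g.foldl
        (fun (answers : PySem.Set String) (answer : String) =>
          if !(PySem.Set.contains answers answer) then PySem.Set.add answers answer else answers)
        ([] : List String)) = PySem.Set.ofList g := pv_inner_fold g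
    simp only [this]
    rw [ih (c + PySem.Set.len (PySem.Set.ofList g)), pv_len_ofList]
    ring

-- adjacent-compare count on a sorted nonempty list = number of distinct elements
lemma pv_sorted_count (a : String) (t : List String)
    (h : (a :: t).Pairwise (· ≤ ·)) :
    1 + (((a :: t).zip t).map (fun p => if p.1 ≠ p.2 then (1 : Int) else 0)).sum
      = ((a :: t).toFinset.card : Int) := by
  induction t generalizing a with
  | nil => simp
  | cons b t' ih =>
    have hbt : (b :: t').Pairwise (· ≤ ·) := h.tail
    have hab : a ≤ b := (List.pairwise_cons.mp h).1 b (List.mem_cons_self)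
    have hih := ih b hbt
    simp only [List.zip_cons_cons, List.map_cons, List.sum_cons]
    by_cases hEq : a = b
    · subst hEq
      have : (a :: a :: t').toFinset = (a :: t').toFinset := by
        ext x; simp [List.mem_toFinset]
      rw [this, ← hih]
      simp
    · have hnm : a ∉ (b :: t').toFinset := by
        intro hm
        have hm' : a ∈ b :: t' := List.mem_toFinset.mp hm
        have hba : b ≤ a := by
          rcases List.mem_cons.mp hm' with hm' | hm'
          · exact le_of_eq hm'.symm
          · exact (List.pairwise_cons.mp hbt).1 a hm' 
        exact hEq (le_antisymm hab hba)
      have hcard : (a :: b :: t').toFinset.card = (b :: t').toFinset.card + 1 := by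
        rw [show (a :: b :: t').toFinset = insert a (b :: t').toFinset from List.toFinset_cons]
        exact Finset.card_insert_of_notMem hnm
      rw [hcard]
      push_cast
      rw [← hih]
      simp [hEq]
      ring

-- B's per-group value = number of distinct elements
lemma pv_group_distinct (g : List String) :
    pvGroupDistinct g = ((g.toFinset.card : Nat) : Int) := by
  unfold pvGroupDistinct
  have hperm := PySem.List.sorted_perm g (fun x => x) false
  have hpw : (PySem.List.sorted g (fun x => x) false).Pairwise (· ≤ ·) :=
    PySem.List.sorted_pairwise g (fun x => x)
  have hfin : (PySem.List.sorted g (fun x => x) false).toFinset = g.toFinset :=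
    List.toFinset_eq_of_perm _ _ hperm
  rcases hs : PySem.List.sorted g (fun x => x) false with _ | ⟨a, t⟩
  · have : g = [] := by
      have := hperm; rw [hs] at this
      exact (List.Perm.nil_eq this).symm
    simp [this]
  · rw [hs] at hpw hfin
    have hslice : PySem.List.slice (a :: t) (some 1) none = t := by
      rw [PySem.List.slice_from (a :: t) (by norm_num : (0:Int) ≤ 1)]
      rfl
    show 1 + (((a :: t).zip (PySem.List.slice (a :: t) (some 1) none)).map
        (fun p => if p.1 ≠ p.2 then (1 : Int) else 0)).sum = ((g.toFinset.card : Nat) : Int)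
    rw [hslice, pv_sorted_count a t hpw, hfin]

lemma pv_B_fold (l : List (List String)) (c : Int) :
    l.foldl (fun total group => total + pvGroupDistinct group) c
      = c + (l.map pvGroupDistinct).sum := by
  induction l generalizing c with
  | nil => simp
  | cons g t ih => simp only [List.foldl_cons, List.map_cons, List.sum_cons]; rw [ih]; ring

-- ===== VERDICT (by name: the statement is the Claim_ definition above) =====
theorem count_anyone_answers_spec : Claim_equal_count_anyone_answers := by
  intro list _
  unfold Spec_count_anyone_answers count_anyone_answers count_anyone_answers_alt
  rw [pv_A_fold list 0, pv_B_fold list 0]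
  simp only [zero_add]
  congr 1
  exact (List.map_congr_left (fun g _ => (pv_group_distinct g).symm))
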